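-- pv_equiv track=rewrite | github.com/buzbarstow/kosudoku | programs/utilities/align.py | Mismatch
-- ===== SOURCE A (Python) =====
-- def Mismatch(Search,n):
--     import itertools
--     SearchL = list(Search)
--     List     = [] # hold output
--     # print list of indices to replace with '$'
--     idxs = itertools.combinations(range(len(SearchL)),n)
--     # for each combination `idx` in idxs, replace str[idx] with '$':
--     for idx in idxs:
--         str = SearchL[:] # make a copy
--         for i in idx:
--             str[i]='[ACTGN]'
--         List.append( ''.join(str) ) # convert back to string
--     return List
-- ===== SOURCE B (Python) =====
-- def Mismatch(Search, n):
--     def go(i, rem, prefix):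
--         if i == len(Search):
--             return [prefix] if rem == 0 else []
--         out = []
--         if rem > 0:
--             out += go(i + 1, rem - 1, prefix + '[ACTGN]')
--         out += go(i + 1, rem, prefix + Search[i])
--         return out
--     return go(0, n, '')
-- ===== Notes on version B (the rewrite author's own statement) =====
-- stated objective: alternative
-- what changed: Replaced the itertools.combinations index enumeration plus per-combination list copy/join with one recursive walk over the string positions carrying (index, remaining replacements, prefix), branching between placing the wildcard and keeping the character.
import Mathlib
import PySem

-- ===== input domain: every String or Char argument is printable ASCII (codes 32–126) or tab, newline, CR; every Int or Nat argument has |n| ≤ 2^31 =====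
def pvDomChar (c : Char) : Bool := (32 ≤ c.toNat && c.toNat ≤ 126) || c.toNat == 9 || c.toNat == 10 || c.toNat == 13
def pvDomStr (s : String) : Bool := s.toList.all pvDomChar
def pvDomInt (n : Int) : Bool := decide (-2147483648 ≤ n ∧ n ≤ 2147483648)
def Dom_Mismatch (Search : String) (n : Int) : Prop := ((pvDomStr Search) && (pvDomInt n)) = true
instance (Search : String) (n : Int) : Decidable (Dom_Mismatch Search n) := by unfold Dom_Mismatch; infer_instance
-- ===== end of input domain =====

-- B replaces the itertools.combinations enumeration + per-combination copy with a single
-- recursion over positions carrying (remaining replacements, prefix); alternative decomposition.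

-- ===== PORT A =====
-- itertools.combinations(range(L), n) in its lexicographic emission order, ported as the
-- standard recursive combinations function (library call of A).
def pvCombos {α : Type} (xs : List α) (k : Nat) : List (List α) :=
  match k, xs with
  | 0, _ => [[]]
  | _ + 1, [] => []
  | k + 1, x :: rest => ((pvCombos rest k).map (fun c => x :: c)) ++ pvCombos rest (k + 1)

-- the inner 'for i in idx: str[i] = "[ACTGN]"' loop; each cell of the copied list is a
-- Python string, modeled as List Char, joined by ''.join at the end
def pvApply (idx : List Nat) (base : List (List Char)) : List (List Char) :=
  idx.foldl (fun s i => s.set i ['[','A','C','T','G','N',']']) base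

def Mismatch (Search : String) (n : Int) : List String :=
  let SearchL := Search.toList
  (pvCombos (List.range SearchL.length) n.toNat).map
    (fun idx => String.mk ((pvApply idx (SearchL.map (fun c => [c]))).flatten))

-- ===== PORT B =====
-- the recursive helper go(i, rem, prefix); the position index is the walk down the char list,
-- the accumulated Python string prefix is modeled as List Char (exact)
def pvGo (cs : List Char) (rem : Int) (pref : List Char) : List String :=
  match cs with
  | [] => if rem == 0 then [String.mk pref] else []
  | c :: rest =>
    (if rem > 0 then pvGo rest (rem - 1) (pref ++ ['[','A','C','T','G','N',']']) else [])
      ++ pvGo rest rem (pref ++ [c])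

def Mismatch_alt (Search : String) (n : Int) : List String :=
  pvGo Search.toList n []

-- ===== PRECONDITION & SPEC =====
-- A raises ValueError when n < 0 (itertools.combinations rejects negative r); excluded here.
def Pre_Mismatch (Search : String) (n : Int) : Prop := 0 ≤ n
instance (Search : String) (n : Int) : Decidable (Pre_Mismatch Search n) := by unfold Pre_Mismatch; infer_instance
def pvWitness_Mismatch : String × Int := ("ACG", 1)

def Spec_Mismatch (Search : String) (n : Int) (out : List String) : Prop := out = Mismatch_alt Search n
instance (Search : String) (n : Int) (out : List String) : Decidable (Spec_Mismatch Search n out) := by unfold Spec_Mismatch; infer_instance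

-- ===== CLAIM (what is proved, stated in full; the proofs are below) =====
def Claim_equal_Mismatch : Prop := ∀ (Search : String) (n : Int), Dom_Mismatch Search n → Pre_Mismatch Search n → Spec_Mismatch Search n (Mismatch Search n)

-- ===== LEMMAS AND PROOFS =====

theorem pvCombos_map {α β : Type} (f : α → β) (xs : List α) (k : Nat) :
    pvCombos (xs.map f) k = (pvCombos xs k).map (List.map f) := by
  induction xs generalizing k with
  | nil => cases k <;> simp [pvCombos]
  | cons x rest ih =>
    cases k with
    | zero => simp [pvCombos]
    | succ k => simp [pvCombos, ih, Function.comp]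

theorem pvApply_succ (idx : List Nat) (a : List Char) (base : List (List Char)) :
    pvApply (idx.map Nat.succ) (a :: base) = a :: pvApply idx base := by
  induction idx generalizing base with
  | nil => simp [pvApply]
  | cons i idx ih => simp [pvApply, List.set] at ih ⊢; exact ih _

theorem pvApply_cons (i : Nat) (js : List Nat) (base : List (List Char)) :
    pvApply (i :: js) base = pvApply js (base.set i ['[','A','C','T','G','N',']']) := rfl

theorem pvGo_eq (cs : List Char) (k : Nat) (pref : List Char) :
    pvGo cs (k : Int) pref =
      (pvCombos (List.range cs.length) k).map
        (fun idx => String.mk (pref ++ (pvApply idx (cs.map (fun c => [c]))).flatten)) := by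
  induction cs generalizing k pref with
  | nil =>
    cases k with
    | zero => simp [pvGo, pvCombos, pvApply]
    | succ k => simp [pvGo, pvCombos, pvApply]; omega
  | cons c rest ih =>
    cases k with
    | zero =>
      have h := ih 0 (pref ++ [c])
      simp [pvGo, pvCombos, pvApply] at h ⊢
      simpa using h
    | succ k =>
      have hpos : ((k + 1 : Nat) : Int) > 0 := by push_cast; omega
      have hsub : ((k + 1 : Nat) : Int) - 1 = (k : Int) := by push_cast; omega
      have h1 := ih k (pref ++ ['[','A','C','T','G','N',']'])
      have h2 := ih (k + 1) (pref ++ [c])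
      simp only [pvGo, if_pos hpos, hsub, h1, h2, List.length_cons,
        List.range_succ_eq_map, pvCombos, pvCombos_map, List.map_append, List.map_map]
      congr 1
      · apply List.map_congr_left
        intro idx _
        simp [Function.comp, pvApply_cons, pvApply_succ, List.append_assoc]
      · apply List.map_congr_left
        intro idx _
        simp [Function.comp, pvApply_succ, List.append_assoc]

-- ===== VERDICT (by name: the statement is the Claim_ definition above) =====
theorem Mismatch_spec : Claim_equal_Mismatch := by
  intro Search n _ hpre
  unfold Spec_Mismatch Mismatch Mismatch_alt
  have hn : n = (n.toNat : Int) := (Int.toNat_of_nonneg hpre).symm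
  rw [hn, pvGo_eq]
  simp [max_eq_left hpre]
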